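-- pv_equiv track=rewrite | github.com/mamo3gr/arai60 | 929_unique-email-addresses/step2.py | _get_local_and_domain_naive
-- ===== SOURCE A (Python) =====
-- def _get_local_and_domain_naive(email: str) -> tuple[str, str]:
--     """
--     emailを走査するのは一度だけにした実装。こちらの方が理論上速そうだが、
--     str.split() や .replace() の方がネイティブ実行なので実際速いみたい。
--     可読性も拡張性も低そう
--     """
--     local_chars = []
--     i = 0
--     while i < len(email):
--         c = email[i]
--
--         if c == ".":
--             i += 1
--             continue
--
--         if c == "+":
--             while i < len(email) and email[i] != "@":
--                 i += 1
--             break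
--
--         if c == "@":
--             break
--
--         local_chars.append(c)
--         i += 1
--
--     local_name = "".join(local_chars)
--     domain_name = email[i + 1 :]
--     return local_name, domain_name
-- ===== SOURCE B (Python) =====
-- def _get_local_and_domain_naive(email: str) -> tuple[str, str]:
--     local, _, domain = email.partition("@")
--     return local.split("+")[0].replace(".", ""), domain
-- ===== Notes on version B (the rewrite author's own statement) =====
-- stated objective: idiomatic
-- what changed: Replaced the manual index while-loop (with an inner skip loop and char accumulator) by native string operations: partition at the separator, truncate the local part at the first plus sign, then remove dots.
import Mathlib
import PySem

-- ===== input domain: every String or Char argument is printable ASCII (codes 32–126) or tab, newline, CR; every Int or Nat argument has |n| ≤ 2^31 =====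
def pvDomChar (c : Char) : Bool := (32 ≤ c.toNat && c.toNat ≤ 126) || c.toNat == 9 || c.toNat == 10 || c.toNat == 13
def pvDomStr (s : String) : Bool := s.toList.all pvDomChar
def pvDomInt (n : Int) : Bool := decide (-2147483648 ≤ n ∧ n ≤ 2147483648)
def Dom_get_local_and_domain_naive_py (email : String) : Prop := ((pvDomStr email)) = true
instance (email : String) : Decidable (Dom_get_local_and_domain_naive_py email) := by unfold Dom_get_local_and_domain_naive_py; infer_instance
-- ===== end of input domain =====

-- B replaces A's manual index while-loop (inner '@'-skip loop + char accumulator) by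
-- native string operations: partition at '@', truncate at the first '+', remove dots. (objective: idiomatic)

-- ===== PORT A =====
-- inner while: 'while i < len(email) and email[i] != "@": i += 1'  — returns the final i
def pvAInner (s : List Char) (i : Nat) : Nat :=
  if h : i < s.length then
    if s[i] ≠ '@' then pvAInner s (i + 1) else i
  else i
termination_by s.length - i

-- outer while loop: state = (local_chars accumulator, index i); returns (local_chars, final i).
-- c = email[i] is read in place; the branch order is A's.
def pvAOuter (s : List Char) (i : Nat) (acc : List Char) : List Char × Nat :=
  if h : i < s.length then
    if s[i] = '.' then pvAOuter s (i + 1) acc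
    else if s[i] = '+' then (acc, pvAInner s i)
    else if s[i] = '@' then (acc, i)
    else pvAOuter s (i + 1) (acc ++ [s[i]])
  else (acc, i)
termination_by s.length - i

def get_local_and_domain_naive_py (email : String) : String × String :=
  let s := email.toList
  let r := pvAOuter s 0 []
  -- email[i + 1 :] : a from-slice with nonnegative start is List.drop (exact here)
  (String.mk r.1, String.mk (s.drop (r.2 + 1)))

-- ===== PORT B =====
-- email.partition("@") with a 1-char separator: before = takeWhile (≠ '@'),
-- after = (dropWhile (≠ '@')).drop 1 (empty when '@' is absent — exact);
-- local.split("+")[0] = takeWhile (≠ '+'); .replace(".", "") = filter (≠ '.')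
def get_local_and_domain_naive_py_alt (email : String) : String × String :=
  let s := email.toList
  let localPart := s.takeWhile (· ≠ '@')
  let domain := (s.dropWhile (· ≠ '@')).drop 1
  (String.mk ((localPart.takeWhile (· ≠ '+')).filter (· ≠ '.')), String.mk domain)

-- ===== PRECONDITION & SPEC =====
def Spec_get_local_and_domain_naive_py (email : String) (out : String × String) : Prop := out = get_local_and_domain_naive_py_alt email
instance (email : String) (out : String × String) : Decidable (Spec_get_local_and_domain_naive_py email out) := by unfold Spec_get_local_and_domain_naive_py; infer_instance

-- ===== CLAIM (what is proved, stated in full; the proofs are below) =====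
def Claim_equal_get_local_and_domain_naive_py : Prop := ∀ (email : String), Dom_get_local_and_domain_naive_py email → Spec_get_local_and_domain_naive_py email (get_local_and_domain_naive_py email)

-- ===== LEMMAS AND PROOFS =====

-- A's final index i is such that s.drop i is the suffix from the first '@' (or [] if none):
-- first for the inner skip loop …
theorem pvAInner_drop (s : List Char) (i : Nat) :
    s.drop (pvAInner s i) = (s.drop i).dropWhile (· ≠ '@') := by
  fun_induction pvAInner s i with
  | case1 i h hne ih =>
      rw [ih, List.drop_eq_getElem_cons h, List.dropWhile_cons]
      simp at hne
      simp [hne]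
  | case2 i h hne =>
      rw [List.drop_eq_getElem_cons h, List.dropWhile_cons]
      simp at hne
      simp [hne]
  | case3 i h =>
      rw [List.drop_eq_nil_of_le (Nat.le_of_not_lt h)]
      simp

-- … then for the outer loop.
theorem pvAOuter_drop (s : List Char) (i : Nat) (acc : List Char) :
    s.drop (pvAOuter s i acc).2 = (s.drop i).dropWhile (· ≠ '@') := by
  fun_induction pvAOuter s i acc with
  | case1 i acc h hdot ih =>
      rw [ih, List.drop_eq_getElem_cons h, List.dropWhile_cons]
      simp [hdot]
  | case2 i acc h hdot hplus =>
      simpa using pvAInner_drop s i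
  | case3 i acc h hdot hplus hat =>
      rw [List.drop_eq_getElem_cons h, List.dropWhile_cons]
      simp [hat]
  | case4 i acc h hdot hplus hat ih =>
      rw [ih, List.drop_eq_getElem_cons h, List.dropWhile_cons]
      simp [hat]
  | case5 i acc h =>
      rw [List.drop_eq_nil_of_le (Nat.le_of_not_lt h)]
      simp

-- A's accumulator equals B's local part, computed on the suffix s.drop i.
theorem pvAOuter_acc (s : List Char) (i : Nat) (acc : List Char) :
    (pvAOuter s i acc).1 =
      acc ++ (((s.drop i).takeWhile (· ≠ '@')).takeWhile (· ≠ '+')).filter (· ≠ '.') := by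
  fun_induction pvAOuter s i acc with
  | case1 i acc h hdot ih =>
      rw [ih, List.drop_eq_getElem_cons h]
      simp [List.takeWhile_cons, List.filter_cons, hdot]
  | case2 i acc h hdot hplus =>
      rw [List.drop_eq_getElem_cons h]
      simp [List.takeWhile_cons, hdot, hplus]
  | case3 i acc h hdot hplus hat =>
      rw [List.drop_eq_getElem_cons h]
      simp [List.takeWhile_cons, hat]
  | case4 i acc h hdot hplus hat ih =>
      rw [ih, List.drop_eq_getElem_cons h]
      simp only [List.takeWhile_cons, List.filter_cons, decide_not, hdot, hplus, hat,
        decide_false, Bool.not_false, if_true, List.append_assoc, List.cons_append,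
        List.nil_append]
  | case5 i acc h =>
      rw [List.drop_eq_nil_of_le (Nat.le_of_not_lt h)]
      simp

-- ===== VERDICT (by name: the statement is the Claim_ definition above) =====
theorem get_local_and_domain_naive_py_spec : Claim_equal_get_local_and_domain_naive_py := by
  intro email _
  unfold Spec_get_local_and_domain_naive_py
  unfold get_local_and_domain_naive_py get_local_and_domain_naive_py_alt
  simp only
  refine Prod.ext ?_ ?_
  · have h := pvAOuter_acc email.toList 0 []
    simp only [List.drop_zero, List.nil_append] at h
    rw [h]
  · have h := pvAOuter_drop email.toList 0 []
    simp only [List.drop_zero] at h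
    rw [← h, ← List.drop_drop]
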